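-- pv_equiv track=rewrite | github.com/JustinDavis7/My-Class-Code | Python/CS 161 - Computer Science I/Hands on Final Review.py | increase_dupe
-- ===== SOURCE A (Python) =====
-- def increase_dupe(nums):
--     """
--     Finds the last duplicated value as well as the largest increase between 2 consecutive index from a list.
--
--     Parameters:
--         nums (list): A list of ints
--
--     Returns:
--         distance: The maximum increase from two consecutive index.
--         dupe: The last value that shows up back-to-back with the same value.
--
--     """
--     distance = 0
--     dupe = 0
--     for index, item in enumerate(nums):
--         if index >= len(nums)-1:
--             break
--         else:
--             distance2 = nums[index+1] - nums[index]
--             if distance2 > distance: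
--                 distance = distance2
--         if nums[index] == nums[index+1]:
--             dupe = nums[index]
--     return distance, dupe
-- ===== SOURCE B (Python) =====
-- def increase_dupe(nums):
--     def rise(lo, hi):
--         # largest increase nums[i+1]-nums[i] for lo <= i < hi-1, floored at 0,
--         # by divide and conquer on the index range (the split ranges overlap by
--         # one element so the boundary pair is covered)
--         if hi - lo < 2:
--             return 0
--         if hi - lo == 2:
--             return max(0, nums[lo + 1] - nums[lo])
--         mid = (lo + hi) // 2
--         return max(rise(lo, mid + 1), rise(mid, hi))
--
--     dupe = 0
--     for i in range(len(nums) - 1, 0, -1):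
--         if nums[i] == nums[i - 1]:
--             dupe = nums[i]
--             break
--     return (rise(0, len(nums)), dupe)
-- ===== Notes on version B (the rewrite author's own statement) =====
-- stated objective: alternative
-- what changed: Replaces A's single fused forward loop with a divide-and-conquer recursion over index ranges for the maximum consecutive increase (floored at 0 by its base case) and a separate backwards scan with early exit that stops at the first back-to-back duplicate seen from the right.
import Mathlib
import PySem

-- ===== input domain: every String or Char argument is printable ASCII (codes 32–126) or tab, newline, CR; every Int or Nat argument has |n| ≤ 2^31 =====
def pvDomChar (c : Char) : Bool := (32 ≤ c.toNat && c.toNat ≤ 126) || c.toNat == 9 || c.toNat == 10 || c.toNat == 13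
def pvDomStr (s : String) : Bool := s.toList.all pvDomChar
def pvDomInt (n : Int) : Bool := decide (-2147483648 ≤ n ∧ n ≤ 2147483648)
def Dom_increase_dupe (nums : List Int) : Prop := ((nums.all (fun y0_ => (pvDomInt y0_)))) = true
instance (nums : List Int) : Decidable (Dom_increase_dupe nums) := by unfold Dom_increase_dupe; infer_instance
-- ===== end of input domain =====

-- B replaces A's fused forward loop with a divide-and-conquer recursion over index
-- ranges for the maximum consecutive increase and a separate backwards early-exit
-- scan for the last back-to-back duplicate (an alternative decomposition, same cost).

-- ===== PORT A =====
-- the for-loop over enumerate(nums) with its break and the two index lookups, step for step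
def increase_dupe_loop (nums : List Int) : List (Int × Int) → Int → Int → Int × Int
  | [], distance, dupe => (distance, dupe)
  | (index, _item) :: rest, distance, dupe =>
    if index ≥ (nums.length : Int) - 1 then (distance, dupe)   -- break
    else
      let distance2 := PySem.List.pyGetD nums (index + 1) 0 - PySem.List.pyGetD nums index 0
      let distance' := if distance2 > distance then distance2 else distance
      let dupe' := if PySem.List.pyGetD nums index 0 = PySem.List.pyGetD nums (index + 1) 0
                   then PySem.List.pyGetD nums index 0 else dupe
      increase_dupe_loop nums rest distance' dupe'

def increase_dupe (nums : List Int) : Int × Int :=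
  increase_dupe_loop nums (PySem.List.enumerate nums) 0 0

-- ===== PORT B =====
-- Python's '//' by 2 is Int.ediv by 2 here (positive divisor); cited by riseRec's termination proof
theorem pvFdiv2 (a : Int) : PySem.Int.floordiv a 2 = a / 2 := by
  simp only [PySem.Int.floordiv]
  rw [Int.fdiv_eq_ediv]
  norm_num

-- rise(lo, hi): divide-and-conquer over the index range, as in Source B
def riseRec (nums : List Int) (lo hi : Int) : Int :=
  if hi - lo < 2 then 0
  else if hi - lo = 2 then
    max 0 (PySem.List.pyGetD nums (lo + 1) 0 - PySem.List.pyGetD nums lo 0)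
  else
    max (riseRec nums lo (PySem.Int.floordiv (lo + hi) 2 + 1))
        (riseRec nums (PySem.Int.floordiv (lo + hi) 2) hi)
termination_by (hi - lo).toNat
decreasing_by
  · rw [pvFdiv2]; omega
  · rw [pvFdiv2]; omega

-- the backwards for-loop over range(len(nums)-1, 0, -1) with its break
def dupeLoop (nums : List Int) : List Int → Int
  | [] => 0
  | i :: rest =>
    if PySem.List.pyGetD nums i 0 = PySem.List.pyGetD nums (i - 1) 0
    then PySem.List.pyGetD nums i 0
    else dupeLoop nums rest

def increase_dupe_alt (nums : List Int) : Int × Int :=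
  let dupe := dupeLoop nums (PySem.List.pyRange ((nums.length : Int) - 1) 0 (-1))
  (riseRec nums 0 (nums.length : Int), dupe)

-- ===== PRECONDITION & SPEC =====
def Spec_increase_dupe (nums : List Int) (out : Int × Int) : Prop := out = increase_dupe_alt nums
instance (nums : List Int) (out : Int × Int) : Decidable (Spec_increase_dupe nums out) := by unfold Spec_increase_dupe; infer_instance

-- ===== CLAIM =====
def Claim_equal_increase_dupe : Prop := ∀ (nums : List Int), Dom_increase_dupe nums → Spec_increase_dupe nums (increase_dupe nums)

-- ===== LEMMAS AND PROOFS =====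

-- one fold over adjacent pairs capturing A's loop body
def pvStep (p : Int × Int) (ab : Int × Int) : Int × Int :=
  (if ab.2 - ab.1 > p.1 then ab.2 - ab.1 else p.1,
   if ab.1 = ab.2 then ab.1 else p.2)

def pvDiffs (nums : List Int) : List Int :=
  (nums.zip nums.tail).map (fun ab => ab.2 - ab.1)

theorem loop_eq_fold (pre post : List Int) (d du : Int) :
    increase_dupe_loop (pre ++ post) (PySem.List.enumerate post (pre.length : Int)) d du
      = (post.zip post.tail).foldl pvStep (d, du) := by
  induction post generalizing pre d du with
  | nil => simp [PySem.List.enumerate_nil, increase_dupe_loop]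
  | cons x rest ih =>
    rw [PySem.List.enumerate_cons]
    cases rest with
    | nil =>
      simp [increase_dupe_loop]
    | cons y rest' =>
      rw [increase_dupe_loop]
      have hlen : ¬ ((pre.length : Int) ≥ ((pre ++ x :: y :: rest').length : Int) - 1) := by
        simp
      rw [if_neg hlen]
      have h0 : PySem.List.pyGetD (pre ++ x :: y :: rest') (pre.length : Int) 0 = x := by
        simp
      have h1 : PySem.List.pyGetD (pre ++ x :: y :: rest') ((pre.length : Int) + 1) 0 = y := by
        have : ((pre.length : Int) + 1) = ((pre ++ [x]).length : Int) := by simp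
        rw [this]
        have := PySem.List.pyGetD_natCast ((pre ++ [x]) ++ y :: rest') (pre ++ [x]).length 0
        simpa using this
      have hrec := ih (pre ++ [x])
        (if y - x > d then y - x else d)
        (if x = y then x else du)
      simp only [List.append_assoc, List.cons_append, List.nil_append, List.length_append,
        List.length_cons, List.length_nil, List.tail_cons] at hrec
      push_cast at hrec
      rw [h0, h1]
      simp only [List.zip_cons_cons, List.tail_cons, List.foldl_cons, pvStep]
      exact hrec

theorem fold_split (pairs : List (Int × Int)) (d du : Int) :
    pairs.foldl pvStep (d, du)
      = ((pairs.map (fun ab => ab.2 - ab.1)).foldl (fun a x => if x > a then x else a) d,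
         pairs.foldl (fun a (ab : Int × Int) => if ab.1 = ab.2 then ab.1 else a) du) := by
  induction pairs generalizing d du with
  | nil => rfl
  | cons p ps ih => simp [pvStep, ih]

theorem fold_max_eq (l : List Int) (d : Int) :
    l.foldl (fun a x => if x > a then x else a) d = l.foldl max d := by
  induction l generalizing d with
  | nil => rfl
  | cons x t ih =>
    have hx : (if x > d then x else d) = max d x := by
      by_cases hh : x > d
      · rw [if_pos hh, max_eq_right hh.le]
      · rw [if_neg hh, max_eq_left (not_lt.mp hh)]
    rw [List.foldl_cons, List.foldl_cons, hx, ih]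

theorem foldl_max_init (l : List Int) (a b : Int) :
    l.foldl max (max a b) = max a (l.foldl max b) := by
  induction l generalizing b with
  | nil => rfl
  | cons x t ih => rw [List.foldl_cons, List.foldl_cons, max_assoc, ih]

theorem foldl_max_nonneg (l : List Int) : ∀ d : Int, 0 ≤ d → 0 ≤ l.foldl max d := by
  induction l with
  | nil => intro d hd; simpa
  | cons x t ih =>
    intro d hd
    rw [List.foldl_cons]
    exact ih _ (le_trans hd (le_max_left _ _))

theorem foldl_max_append0 (u v : List Int) :
    (u ++ v).foldl max 0 = max (u.foldl max 0) (v.foldl max 0) := by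
  calc (u ++ v).foldl max 0
      = List.foldl max (max (u.foldl max 0) 0) v := by
        rw [List.foldl_append, max_eq_left (foldl_max_nonneg u 0 le_rfl)]
    _ = max (u.foldl max 0) (v.foldl max 0) := foldl_max_init v _ _

theorem riseRec_eq (nums : List Int) : ∀ (m : Nat) (lo hi : Int), (hi - lo).toNat ≤ m →
    0 ≤ lo → hi ≤ (nums.length : Int) →
    riseRec nums lo hi = (((pvDiffs nums).drop lo.toNat).take (hi - lo - 1).toNat).foldl max 0 := by
  intro m
  induction m with
  | zero =>
    intro lo hi hm _ _
    rw [riseRec, if_pos (by omega)]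
    have h0 : (hi - lo - 1).toNat = 0 := by omega
    simp [h0]
  | succ m ih =>
    intro lo hi hm hlo hhi
    rw [riseRec]
    by_cases h2 : hi - lo < 2
    · rw [if_pos h2]
      have h0 : (hi - lo - 1).toNat = 0 := by omega
      simp [h0]
    · rw [if_neg h2]
      have hdlen : (pvDiffs nums).length = nums.length - 1 := by
        simp [pvDiffs, List.length_zip, List.length_tail]
      by_cases he : hi - lo = 2
      · rw [if_pos he]
        have hl1 : lo.toNat + 1 < nums.length := by omega
        have hl0 : lo.toNat < nums.length := by omega
        have hlt : lo.toNat < (pvDiffs nums).length := by omega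
        have hone : (hi - lo - 1).toNat = 1 := by omega
        rw [hone, List.drop_eq_getElem_cons hlt]
        simp only [List.take_succ_cons, List.take_zero, List.foldl_cons, List.foldl_nil]
        have hgd : (pvDiffs nums)[lo.toNat]'hlt = nums[lo.toNat + 1]'hl1 - nums[lo.toNat]'hl0 := by
          simp [pvDiffs, List.getElem_zip, List.getElem_tail]
        rw [hgd,
          PySem.List.pyGetD_eq_getElem nums 0 (show (0:Int) ≤ lo + 1 by omega)
            (show lo + 1 < (nums.length : Int) by omega),
          PySem.List.pyGetD_eq_getElem nums 0 (show (0:Int) ≤ lo by omega)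
            (show lo < (nums.length : Int) by omega)]
        have e1 : (lo + 1).toNat = lo.toNat + 1 := by omega
        simp [e1]
      · rw [if_neg he]
        have h3 : 3 ≤ hi - lo := by omega
        have hmid : 2 * (PySem.Int.floordiv (lo + hi) 2) ≤ lo + hi ∧
            lo + hi < 2 * (PySem.Int.floordiv (lo + hi) 2) + 2 := by
          rw [pvFdiv2]; omega
        set mid := PySem.Int.floordiv (lo + hi) 2 with hmiddef
        clear_value mid
        have hb1 : lo + 1 ≤ mid := by omega
        have hb2 : mid ≤ hi - 2 := by omega
        have hf1 : (mid + 1 - lo).toNat ≤ m := by omega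
        have hf2 : mid + 1 ≤ (nums.length : Int) := by omega
        have hf3 : (hi - mid).toNat ≤ m := by omega
        have hf4 : (0:Int) ≤ mid := by omega
        rw [ih lo (mid + 1) hf1 hlo hf2, ih mid hi hf3 hf4 hhi]
        have hsplit : (hi - lo - 1).toNat = (mid + 1 - lo - 1).toNat + (hi - mid - 1).toNat := by
          omega
        rw [hsplit, List.take_add, foldl_max_append0]
        have hdd : ((pvDiffs nums).drop lo.toNat).drop (mid + 1 - lo - 1).toNat
            = (pvDiffs nums).drop mid.toNat := by
          rw [List.drop_drop]
          congr 1
          omega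
        rw [hdd]

-- pyRange with step -1: list(range(k, 0, -1))
theorem pyRange_negone_eq (k : Int) :
    PySem.List.pyRange k 0 (-1) = (List.range k.toNat).map (fun j : Nat => k - (j : Int)) := by
  simp only [PySem.List.pyRange]
  rw [if_neg (by norm_num : ¬ (-1 : Int) = 0), if_neg (by norm_num : ¬ (0:Int) < -1)]
  by_cases h : 0 < k
  · rw [if_pos h]
    have hc : ((k - 0 + - -1 - 1) / - -1).toNat = k.toNat := by
      have : (k - 0 + - -1 - 1) / - -1 = k := by
        have : k - 0 + - -1 - 1 = k := by ring
        rw [this]; simp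
      rw [this]
    rw [hc]
    apply List.map_congr_left
    intro j _
    ring
  · rw [if_neg h]
    have : k.toNat = 0 := by omega
    simp [this]

theorem pyRange_negone_cons (k : Int) (h : 0 < k) :
    PySem.List.pyRange k 0 (-1) = k :: PySem.List.pyRange (k - 1) 0 (-1) := by
  rw [pyRange_negone_eq, pyRange_negone_eq]
  obtain ⟨n, hn⟩ : ∃ n : Nat, k.toNat = n + 1 := ⟨k.toNat - 1, by omega⟩
  have hk1 : (k - 1).toNat = n := by omega
  rw [hn, hk1, List.range_succ_eq_map, List.map_cons, List.map_map]
  have h0 : k - ((0:Nat) : Int) = k := by simp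
  rw [h0]
  congr 1
  apply List.map_congr_left
  intro j _
  simp [Function.comp, Nat.succ_eq_add_one]
  ring

theorem dupeLoop_eq (nums : List Int) : ∀ (k : Nat), k ≤ (nums.zip nums.tail).length →
    dupeLoop nums (PySem.List.pyRange (k : Int) 0 (-1))
      = ((nums.zip nums.tail).take k).foldl (fun a (ab : Int × Int) => if ab.1 = ab.2 then ab.1 else a) 0 := by
  intro k
  induction k with
  | zero =>
    intro _
    rw [pyRange_negone_eq]
    simp [dupeLoop]
  | succ k ih =>
    intro hk
    have hplen : (nums.zip nums.tail).length = nums.length - 1 := by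
      simp [List.length_zip, List.length_tail]
    have hk1 : k + 1 < nums.length := by omega
    have hcast : (((k + 1 : Nat)) : Int) = (k : Int) + 1 := by push_cast; ring
    rw [hcast, pyRange_negone_cons _ (by positivity)]
    have hsub : (k : Int) + 1 - 1 = (k : Int) := by ring
    rw [dupeLoop, hsub]
    have hg1 : PySem.List.pyGetD nums ((k : Int) + 1) 0 = nums[k + 1]'hk1 := by
      rw [PySem.List.pyGetD_eq_getElem nums 0 (show (0:Int) ≤ (k:Int) + 1 by omega)
        (show (k:Int) + 1 < (nums.length : Int) by omega)]
      have e : ((k:Int) + 1).toNat = k + 1 := by omega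
      simp [e]
    have hg0 : PySem.List.pyGetD nums ((k : Int)) 0 = nums[k]'(by omega) := by
      rw [PySem.List.pyGetD_eq_getElem nums 0 (show (0:Int) ≤ (k:Int) by omega)
        (show (k:Int) < (nums.length : Int) by omega)]
      simp
    have hzk : k < (nums.zip nums.tail).length := by omega
    have hpk : (nums.zip nums.tail)[k] = (nums[k]'(by omega), nums[k + 1]'hk1) := by
      rw [List.getElem_zip]
      congr 1
      rw [List.getElem_tail]
    rw [List.take_add_one, List.getElem?_eq_getElem hzk]
    simp only [Option.toList_some, List.foldl_append, List.foldl_cons, List.foldl_nil, hpk]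
    rw [hg1, hg0]
    by_cases heq : nums[k + 1]'hk1 = nums[k]'(by omega)
    · rw [if_pos heq, if_pos heq.symm, heq]
    · rw [if_neg heq, if_neg (fun a => heq a.symm)]
      exact ih (by omega)

-- ===== VERDICT =====
theorem increase_dupe_spec : Claim_equal_increase_dupe := by
  intro nums _
  have h := loop_eq_fold [] nums 0 0
  simp only [List.nil_append, List.length_nil, Int.natCast_zero] at h
  simp only [Spec_increase_dupe, increase_dupe, increase_dupe_alt]
  rw [h, fold_split, fold_max_eq]
  have hplen : (nums.zip nums.tail).length = nums.length - 1 := by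
    simp [List.length_zip, List.length_tail]
  have hdist : riseRec nums 0 (nums.length : Int)
      = ((nums.zip nums.tail).map (fun ab => ab.2 - ab.1)).foldl max 0 := by
    rw [riseRec_eq nums ((nums.length : Int) - 0).toNat 0 (nums.length : Int) (le_refl _)
        (le_refl _) (le_refl _)]
    have hd0 : (0 : Int).toNat = 0 := rfl
    rw [hd0, List.drop_zero]
    congr 1
    apply List.take_of_length_le
    simp only [pvDiffs, List.length_map]
    omega
  have hdupe : dupeLoop nums (PySem.List.pyRange ((nums.length : Int) - 1) 0 (-1))
      = (nums.zip nums.tail).foldl (fun a (ab : Int × Int) => if ab.1 = ab.2 then ab.1 else a) 0 := by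
    cases nums with
    | nil => rfl
    | cons x t =>
      have hc : (((x :: t).length : Int) - 1) = (((x :: t).zip (x :: t).tail).length : Int) := by
        simp [List.length_zip]
      rw [hc, dupeLoop_eq (x :: t) ((x :: t).zip (x :: t).tail).length (le_refl _),
        List.take_length]
  rw [hdist, hdupe]
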